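-- pv_equiv track=rewrite | github.com/mendeltem/dcm_to_bids_structure | dicom_to_bids.py | path_converter
-- ===== SOURCE A (Python) =====
-- def path_converter(text_path):
--     """Convert a path with a space into space with backslash"""
--
--     out = ''
--     out_list = []
--
--     for i, t in enumerate(text_path):
--
--         if t == ' ':
--             out_list.append('\\ ')
--         elif t == "(" :
--             out_list.append('\(')
--         elif t == ")" :
--             out_list.append('\)')
--         else:
--             out_list.append(t)
--
--     return out.join(out_list)
-- ===== SOURCE B (Python) =====
-- def path_converter(text_path):
--     """Convert a path with a space into space with backslash"""
--     return text_path.replace(' ', '\\ ').replace('(', '\\(').replace(')', '\\)')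
-- ===== Notes on version B (the rewrite author's own statement) =====
-- stated objective: idiomatic
-- what changed: Replaces the per-character enumerate loop that appends escaped pieces to a list and joins them with three chained str.replace passes over the whole string (C-level scans instead of a Python-level per-character loop).
import Mathlib
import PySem

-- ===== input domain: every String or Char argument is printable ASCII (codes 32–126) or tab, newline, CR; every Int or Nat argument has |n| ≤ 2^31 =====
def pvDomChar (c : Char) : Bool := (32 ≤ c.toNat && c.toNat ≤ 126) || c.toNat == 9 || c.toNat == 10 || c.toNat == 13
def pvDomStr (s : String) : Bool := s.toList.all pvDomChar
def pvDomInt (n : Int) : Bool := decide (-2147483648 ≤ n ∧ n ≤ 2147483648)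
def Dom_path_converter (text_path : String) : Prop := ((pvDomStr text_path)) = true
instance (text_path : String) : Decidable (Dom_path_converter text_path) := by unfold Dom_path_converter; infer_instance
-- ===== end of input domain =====

-- B replaces A's per-character loop + list + join with three chained str.replace passes (idiomatic).

-- ===== PORT A =====
def path_converter (text_path : String) : String :=
  -- out = ''; out_list = []; for i, t in enumerate(text_path): append the escaped piece; return out.join(out_list)
  let out : String := ""
  let out_list : List String :=
    (PySem.List.enumerate text_path.toList).foldl (fun out_list it =>
      let t := it.2
      if t = ' ' then out_list ++ ["\\ "]
      else if t = '(' then out_list ++ ["\\("]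
      else if t = ')' then out_list ++ ["\\)"]
      else out_list ++ [String.ofList [t]]) []
  PySem.Str.join out out_list

-- ===== PORT B =====
def path_converter_alt (text_path : String) : String :=
  PySem.Str.replace (PySem.Str.replace (PySem.Str.replace text_path " " "\\ ") "(" "\\(") ")" "\\)"

-- ===== PRECONDITION & SPEC =====
def Spec_path_converter (text_path : String) (out : String) : Prop := out = path_converter_alt text_path
instance (text_path : String) (out : String) : Decidable (Spec_path_converter text_path out) := by unfold Spec_path_converter; infer_instance

-- ===== CLAIM (what is proved, stated in full; the proofs are below) =====
def Claim_equal_path_converter : Prop := ∀ (text_path : String), Dom_path_converter text_path → Spec_path_converter text_path (path_converter text_path)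

-- ===== LEMMAS AND PROOFS =====

-- single-character replace is a flatMap over the characters
theorem replace_go_single (c : Char) (r : List Char) :
    ∀ (fuel : Nat) (l acc : List Char), l.length ≤ fuel →
      PySem.Chars.replace.go [c] r fuel l acc =
        acc.reverse ++ l.flatMap (fun x => if x = c then r else [x]) := by
  intro fuel
  induction fuel with
  | zero =>
    intro l acc h
    have : l = [] := List.length_eq_zero_iff.mp (Nat.le_zero.mp h)
    subst this
    simp [PySem.Chars.replace.go]
  | succ n ih =>
    intro l acc h
    cases l with
    | nil => simp [PySem.Chars.replace.go]
    | cons x t =>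
      have ht : t.length ≤ n := by simpa using Nat.le_of_succ_le_succ h
      simp only [PySem.Chars.replace.go]
      by_cases hx : x = c
      · subst hx
        have hpre : List.isPrefixOf [x] (x :: t) = true := by
          simp [List.isPrefixOf]
        rw [if_pos hpre]
        simp only [List.length_cons, List.length_nil, Nat.zero_add, List.drop_succ_cons,
          List.drop_zero]
        rw [ih t _ ht]
        simp
      · have hpre : List.isPrefixOf [c] (x :: t) = false := by
          simp only [List.isPrefixOf, Bool.and_true, beq_eq_false_iff_ne]
          exact fun h' => hx h'.symm
        rw [hpre]
        simp only [Bool.false_eq_true, if_false]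
        rw [ih t _ ht]
        simp [hx]

theorem replace_single (c : Char) (r s : List Char) :
    PySem.Chars.replace s [c] r = s.flatMap (fun x => if x = c then r else [x]) := by
  rw [PySem.Chars.replace]
  simp only [List.isEmpty_cons, Bool.false_eq_true, if_false]
  simpa using replace_go_single c r s.length s [] (le_refl _)

-- per character, the three chained single-char substitutions equal A's escaped piece
theorem char_chain (x : Char) :
    (if x = ' ' then "\\ ".toList else [x]).flatMap
        (fun y => (if y = '(' then "\\(".toList else [y]).flatMap
          (fun z => if z = ')' then "\\)".toList else [z])) =
    (if x = ' ' then "\\ "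
     else if x = '(' then "\\("
     else if x = ')' then "\\)"
     else String.ofList [x]).toList := by
  by_cases h1 : x = ' '
  · subst h1; decide
  · by_cases h2 : x = '('
    · subst h2; decide
    · by_cases h3 : x = ')'
      · subst h3; decide
      · simp [h1, h2, h3]

-- A's foldl over enumerate builds the list of escaped pieces, one per character
theorem fold_eq_map (xs : List Char) :
    (PySem.List.enumerate xs).foldl (fun out_list it =>
      let t := it.2
      if t = ' ' then out_list ++ ["\\ "]
      else if t = '(' then out_list ++ ["\\("]
      else if t = ')' then out_list ++ ["\\)"]
      else out_list ++ [String.ofList [t]]) [] =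
    xs.map (fun t =>
      if t = ' ' then "\\ "
      else if t = '(' then "\\("
      else if t = ')' then "\\)"
      else String.ofList [t]) := by
  have hgen : ∀ (l : List (Int × Char)) (acc : List String),
      l.foldl (fun out_list it =>
        let t := it.2
        if t = ' ' then out_list ++ ["\\ "]
        else if t = '(' then out_list ++ ["\\("]
        else if t = ')' then out_list ++ ["\\)"]
        else out_list ++ [String.ofList [t]]) acc =
      acc ++ l.map (fun it =>
        if it.2 = ' ' then "\\ "
        else if it.2 = '(' then "\\("
        else if it.2 = ')' then "\\)"
        else String.ofList [it.2]) := by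
    intro l
    induction l with
    | nil => intro acc; simp
    | cons p l ih =>
      intro acc
      simp only [List.foldl_cons, List.map_cons, ih]
      split_ifs <;> simp
  rw [hgen, List.nil_append]
  have := PySem.List.map_snd_enumerate xs (0 : Int)
  calc (PySem.List.enumerate xs).map (fun it =>
        if it.2 = ' ' then "\\ "
        else if it.2 = '(' then "\\("
        else if it.2 = ')' then "\\)"
        else String.ofList [it.2])
      = ((PySem.List.enumerate xs).map (·.2)).map (fun t =>
        if t = ' ' then "\\ "
        else if t = '(' then "\\("
        else if t = ')' then "\\)"
        else String.ofList [t]) := by rw [List.map_map]; rfl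
    _ = _ := by rw [this]

-- joining with the empty separator flattens
theorem join_empty (L : List (List Char)) :
    PySem.Chars.join [] L = L.flatten := by
  induction L with
  | nil => rfl
  | cons a L ih =>
    cases L with
    | nil => simp [PySem.Chars.join, List.intercalate]
    | cons b L' =>
      rw [PySem.Chars.join_cons_cons, ih]
      simp

-- ===== VERDICT (by name: the statement is the Claim_ definition above) =====
theorem path_converter_spec : Claim_equal_path_converter := by
  intro s _
  unfold Spec_path_converter path_converter path_converter_alt
  simp only [PySem.Str.replace]
  rw [String.toList_ofList, String.toList_ofList]
  have e1 : (" " : String).toList = [' '] := rfl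
  have e2 : ("(" : String).toList = ['('] := rfl
  have e3 : (")" : String).toList = [')'] := rfl
  rw [e1, e2, e3]
  rw [replace_single, replace_single, replace_single]
  simp only [List.flatMap_assoc]
  rw [fold_eq_map]
  simp only [PySem.Str.join]
  apply congrArg String.ofList
  simp only [String.toList_empty, List.map_map]
  rw [join_empty]
  rw [← List.flatMap_def]
  apply List.flatMap_congr
  intro x _
  simp only [Function.comp]
  exact (char_chain x).symm
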